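-- pv_equiv track=rewrite | github.com/GregorySchwing/MaxMatchingKececioglu | graphs/kidney/kidney_parallel.py | balanced_groups
-- ===== SOURCE A (Python) =====
-- def balanced_groups(n, num_groups):
--     total = n * (n + 1) // 2  # Sum of 1 to n
--     group_size = total // num_groups  # Calculate the target group size
--
--     groups = []
--     current_group = []  # Initialize the current group
--     current_sum = 0
--
--     for i, j in zip(range(1, n + 1), range(n, 0, -1)):
--         current_group.append(i-1)
--         current_sum += j
--
--         # If the current sum exceeds or equals the target group size, start a new group
--         if current_sum >= group_size:
--             groups.append(current_group)
--             current_group = []  # Start a new group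
--             current_sum = 0
--
--     # Add the last group if it's not empty
--     if current_group:
--         groups.append(current_group)
--
--     return groups
-- ===== SOURCE B (Python) =====
-- def balanced_groups(n, num_groups):
--     group_size = n * (n + 1) // 2 // num_groups
--     # First pass: record cut positions (element counts) where the greedy sum resets.
--     cuts = []
--     current_sum = 0
--     for count, j in enumerate(range(n, 0, -1), start=1):
--         current_sum += j
--         if current_sum >= group_size:
--             cuts.append(count)
--             current_sum = 0
--     # Second pass: materialise each group as a contiguous index range.
--     groups = []
--     prev = 0
--     for cut in cuts:
--         groups.append(list(range(prev, cut)))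
--         prev = cut
--     if prev < n:
--         groups.append(list(range(prev, n)))
--     return groups
-- ===== Notes on version B (the rewrite author's own statement) =====
-- stated objective: alternative
-- what changed: A builds the groups directly in one greedy loop that accumulates the current group list; B first scans the descending weights once to record only the cut positions, then a second pass materialises each group as a contiguous range(prev, cut), with a trailing range(last_cut, n) group.
import Mathlib
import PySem

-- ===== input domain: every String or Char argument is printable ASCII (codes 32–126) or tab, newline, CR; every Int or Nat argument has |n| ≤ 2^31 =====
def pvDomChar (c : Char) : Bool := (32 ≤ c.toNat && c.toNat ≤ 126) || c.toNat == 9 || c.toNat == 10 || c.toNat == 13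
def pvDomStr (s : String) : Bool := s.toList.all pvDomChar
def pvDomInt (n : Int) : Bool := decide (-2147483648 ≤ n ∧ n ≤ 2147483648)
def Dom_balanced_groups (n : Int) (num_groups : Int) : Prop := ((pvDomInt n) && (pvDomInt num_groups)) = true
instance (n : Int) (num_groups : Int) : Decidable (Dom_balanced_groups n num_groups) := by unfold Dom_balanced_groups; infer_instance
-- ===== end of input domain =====

-- B replaces A's list-accumulating greedy loop by a two-pass decomposition: first
-- collect cut positions, then materialise each group as a contiguous range (same cost).

-- ===== PORT A =====
-- literal port of A: one fold carrying (groups, current_group, current_sum)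
def balanced_groups (n : Int) (num_groups : Int) : List (List Int) :=
  let total := PySem.Int.floordiv (n * (n + 1)) 2
  let group_size := PySem.Int.floordiv total num_groups
  let st := ((PySem.List.pyRange 1 (n + 1) 1).zip (PySem.List.pyRange n 0 (-1))).foldl
    (fun (s : List (List Int) × List Int × Int) p =>
      let current_group := s.2.1 ++ [p.1 - 1]
      let current_sum := s.2.2 + p.2
      if current_sum ≥ group_size then (s.1 ++ [current_group], [], 0)
      else (s.1, current_group, current_sum))
    ([], [], 0)
  if st.2.1 ≠ [] then st.1 ++ [st.2.1] else st.1

-- ===== PORT B =====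
-- B-side helper: the second pass of Source B (walk consecutive cuts, build ranges)
def pvBuildCuts (cuts : List Int) : List (List Int) × Int :=
  cuts.foldl (fun (s : List (List Int) × Int) c => (s.1 ++ [PySem.List.pyRange s.2 c 1], c)) ([], 0)

def balanced_groups_alt (n : Int) (num_groups : Int) : List (List Int) :=
  let group_size := PySem.Int.floordiv (PySem.Int.floordiv (n * (n + 1)) 2) num_groups
  let st := (PySem.List.enumerate (PySem.List.pyRange n 0 (-1)) 1).foldl
    (fun (s : List Int × Int) p =>
      let current_sum := s.2 + p.2
      if current_sum ≥ group_size then (s.1 ++ [p.1], 0) else (s.1, current_sum))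
    ([], 0)
  let g := pvBuildCuts st.1
  if g.2 < n then g.1 ++ [PySem.List.pyRange g.2 n 1] else g.1

-- ===== PRECONDITION & SPEC =====
-- Pre_ excludes exactly num_groups = 0, where Python A raises ZeroDivisionError.
def Pre_balanced_groups (n : Int) (num_groups : Int) : Prop := num_groups ≠ 0
instance (n : Int) (num_groups : Int) : Decidable (Pre_balanced_groups n num_groups) := by unfold Pre_balanced_groups; infer_instance
def pvWitness_balanced_groups : Int × Int := (7, 3)

def Spec_balanced_groups (n : Int) (num_groups : Int) (out : List (List Int)) : Prop := out = balanced_groups_alt n num_groups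
instance (n : Int) (num_groups : Int) (out : List (List Int)) : Decidable (Spec_balanced_groups n num_groups out) := by unfold Spec_balanced_groups; infer_instance

-- ===== CLAIM (what is proved, stated in full; the proofs are below) =====
def Claim_equal_balanced_groups : Prop := ∀ (n : Int) (num_groups : Int), Dom_balanced_groups n num_groups → Pre_balanced_groups n num_groups → Spec_balanced_groups n num_groups (balanced_groups n num_groups)

-- ===== LEMMAS AND PROOFS =====

lemma pvBuildCuts_snoc (cuts : List Int) (c : Int) :
    pvBuildCuts (cuts ++ [c]) =
      ((pvBuildCuts cuts).1 ++ [PySem.List.pyRange (pvBuildCuts cuts).2 c 1], c) := by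
  simp [pvBuildCuts, List.foldl_append]

lemma zip_pyRange_eq_enumerate {α : Type} : ∀ (ws : List α) (s : Int),
    (PySem.List.pyRange s (s + ws.length) 1).zip ws = PySem.List.enumerate ws s := by
  intro ws
  induction ws with
  | nil => intro s; simp
  | cons w ws ih =>
    intro s
    rw [PySem.List.pyRange_one_cons (by simp only [List.length_cons]; push_cast; omega)]
    have : s + ((w :: ws).length : Int) = (s + 1) + ws.length := by simp only [List.length_cons]; push_cast; omega
    rw [this]
    simp [PySem.List.enumerate_cons, ih (s + 1)]

-- the joint loop invariant: A's fold state is determined by B's (cuts, sum) state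
lemma pv_loop_inv (g : Int) : ∀ (ws : List Int) (k : Int) (cuts : List Int) (s : Int),
    0 ≤ (pvBuildCuts cuts).2 → (pvBuildCuts cuts).2 ≤ k →
    (PySem.List.enumerate ws (k + 1)).foldl
        (fun (st : List (List Int) × List Int × Int) p =>
          let current_group := st.2.1 ++ [p.1 - 1]
          let current_sum := st.2.2 + p.2
          if current_sum ≥ g then (st.1 ++ [current_group], [], 0)
          else (st.1, current_group, current_sum))
        ((pvBuildCuts cuts).1, PySem.List.pyRange (pvBuildCuts cuts).2 k 1, s)
      =
      (let st := (PySem.List.enumerate ws (k + 1)).foldl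
          (fun (st : List Int × Int) p =>
            let current_sum := st.2 + p.2
            if current_sum ≥ g then (st.1 ++ [p.1], 0) else (st.1, current_sum))
          (cuts, s)
       ((pvBuildCuts st.1).1, PySem.List.pyRange (pvBuildCuts st.1).2 (k + ws.length) 1, st.2)) ∧
    0 ≤ (pvBuildCuts ((PySem.List.enumerate ws (k + 1)).foldl
          (fun (st : List Int × Int) p =>
            let current_sum := st.2 + p.2
            if current_sum ≥ g then (st.1 ++ [p.1], 0) else (st.1, current_sum))
          (cuts, s)).1).2 ∧
    (pvBuildCuts ((PySem.List.enumerate ws (k + 1)).foldl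
          (fun (st : List Int × Int) p =>
            let current_sum := st.2 + p.2
            if current_sum ≥ g then (st.1 ++ [p.1], 0) else (st.1, current_sum))
          (cuts, s)).1).2 ≤ k + ws.length := by
  intro ws
  induction ws with
  | nil => intro k cuts s h0 hk; simp [PySem.List.enumerate_nil]; exact ⟨h0, hk⟩
  | cons w ws ih =>
    intro k cuts s h0 hk
    rw [PySem.List.enumerate_cons]
    simp only [List.foldl_cons]
    have hcg : PySem.List.pyRange (pvBuildCuts cuts).2 k 1 ++ [k + 1 - 1] =
        PySem.List.pyRange (pvBuildCuts cuts).2 (k + 1) 1 := by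
      have : k + 1 - 1 = k := by omega
      rw [this, PySem.List.pyRange_one_succ_right hk]
    by_cases hge : s + w ≥ g
    · simp only [hcg, if_pos hge]
      have hsn := pvBuildCuts_snoc cuts (k + 1)
      have hp1 : 0 ≤ (pvBuildCuts (cuts ++ [k + 1])).2 := by rw [hsn]; dsimp only; omega
      have hp2 : (pvBuildCuts (cuts ++ [k + 1])).2 ≤ k + 1 := by rw [hsn]
      have h := ih (k + 1) (cuts ++ [k + 1]) 0 hp1 hp2
      rw [hsn] at h
      have harr : (k + 1) + (ws.length : Int) = k + ((w :: ws).length : Int) := by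
        simp only [List.length_cons]; push_cast; omega
      rw [harr] at h
      rw [PySem.List.pyRange_one_eq_nil (le_refl (k + 1))] at h
      exact h
    · simp only [hcg, if_neg hge]
      have h := ih (k + 1) cuts (s + w) h0 (by omega)
      have harr : (k + 1) + (ws.length : Int) = k + ((w :: ws).length : Int) := by
        simp only [List.length_cons]; push_cast; omega
      rw [harr] at h
      exact h

lemma pyRange_ne_nil_iff (a b : Int) : PySem.List.pyRange a b 1 ≠ [] ↔ a < b := by
  constructor
  · intro h
    by_contra hab
    exact h (PySem.List.pyRange_one_eq_nil (by omega))
  · intro h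
    rw [PySem.List.pyRange_one_cons h]
    simp

-- ===== VERDICT (by name: the statement is the Claim_ definition above) =====
theorem balanced_groups_spec : Claim_equal_balanced_groups := by
  intro n num_groups _ _
  unfold Spec_balanced_groups balanced_groups balanced_groups_alt
  set g := PySem.Int.floordiv (PySem.Int.floordiv (n * (n + 1)) 2) num_groups with hg
  simp only []
  -- identify the two iteration lists
  have hlist : (PySem.List.pyRange 1 (n + 1) 1).zip (PySem.List.pyRange n 0 (-1)) =
      PySem.List.enumerate (PySem.List.pyRange n 0 (-1)) 1 := by
    by_cases hn : 0 < n
    · have hlen : ((PySem.List.pyRange n 0 (-1)).length : Int) = n := by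
        rw [PySem.List.length_pyRange_neg_one]; omega
      have := zip_pyRange_eq_enumerate (PySem.List.pyRange n 0 (-1)) 1
      rw [hlen] at this
      have h1 : (1 : Int) + n = n + 1 := by omega
      rw [h1] at this
      exact this
    · rw [PySem.List.pyRange_neg_one_eq_nil (by omega)]
      simp
  have hinv := pv_loop_inv g (PySem.List.pyRange n 0 (-1)) 0 [] 0 (by simp [pvBuildCuts])
      (by simp [pvBuildCuts])
  have h01 : ((0 : Int) + 1) = 1 := by omega
  rw [h01] at hinv
  have hbase1 : (pvBuildCuts []).1 = ([] : List (List Int)) := by simp [pvBuildCuts]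
  have hbase2 : (pvBuildCuts []).2 = (0 : Int) := by simp [pvBuildCuts]
  rw [hbase1, hbase2, PySem.List.pyRange_one_eq_nil (le_refl 0)] at hinv
  rw [hlist, hinv.1]
  set stB := (PySem.List.enumerate (PySem.List.pyRange n 0 (-1)) 1).foldl
      (fun (st : List Int × Int) p =>
        let current_sum := st.2 + p.2
        if current_sum ≥ g then (st.1 ++ [p.1], 0) else (st.1, current_sum))
      ([], 0) with hstB
  have hlen' : (0 : Int) + ((PySem.List.pyRange n 0 (-1)).length : Int) =
      if 0 < n then n else 0 := by
    rw [PySem.List.length_pyRange_neg_one]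
    split_ifs with h <;> omega
  by_cases hn : 0 < n
  · rw [hlen', if_pos hn] at hinv ⊢
    have hP := hinv.2.2
    by_cases hPn : (pvBuildCuts stB.1).2 < n
    · rw [if_pos ((pyRange_ne_nil_iff _ _).mpr hPn), if_pos hPn]
    · rw [if_neg (by rw [pyRange_ne_nil_iff]; omega), if_neg hPn]
  · -- n ≤ 0: the iteration list is empty on both sides
    have hws : PySem.List.pyRange n 0 (-1) = [] := PySem.List.pyRange_neg_one_eq_nil (by omega)
    rw [hlen', if_neg hn]
    have hstB' : stB = ([], 0) := by rw [hstB, hws]; simp [PySem.List.enumerate_nil]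
    rw [hstB']
    simp only [pvBuildCuts, List.foldl_nil]
    rw [if_neg (by rw [pyRange_ne_nil_iff]; omega), if_neg (by omega)]
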